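-- pv_equiv track=rewrite | github.com/MaksRedka/Paralel_computing__course_work | main.py | distance_between_word
-- ===== SOURCE A (Python) =====
-- def distance_between_word(word_index_1, word_index_2, distance):
--     """
--     To judge whether the distance between the two words is equal distance
--     """
--     distance_list = []
--     for index_1 in word_index_1:
--         for index_2 in word_index_2:
--             if (index_1 < index_2):
--                 if (index_2 - index_1 == distance):
--                     distance_list.append(index_1)
--             else:
--                 continue
--     return distance_list
-- ===== SOURCE B (Python) =====
-- def distance_between_word(word_index_1, word_index_2, distance):
--     # Build a count table of word_index_2 once, then one pass over word_index_1.
--     if distance <= 0: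
--         return []
--     cnt = {}
--     for j in word_index_2:
--         cnt[j] = cnt.get(j, 0) + 1
--     res = []
--     for i in word_index_1:
--         res += [i] * cnt.get(i + distance, 0)
--     return res
-- ===== Notes on version B (the rewrite author's own statement) =====
-- stated objective: faster
-- what changed: Replaces A's nested scan of word_index_2 for every index_1 by a count dictionary of word_index_2 built once plus a single pass over word_index_1 (and an early [] return for distance <= 0, where no pair can match).
import Mathlib
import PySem

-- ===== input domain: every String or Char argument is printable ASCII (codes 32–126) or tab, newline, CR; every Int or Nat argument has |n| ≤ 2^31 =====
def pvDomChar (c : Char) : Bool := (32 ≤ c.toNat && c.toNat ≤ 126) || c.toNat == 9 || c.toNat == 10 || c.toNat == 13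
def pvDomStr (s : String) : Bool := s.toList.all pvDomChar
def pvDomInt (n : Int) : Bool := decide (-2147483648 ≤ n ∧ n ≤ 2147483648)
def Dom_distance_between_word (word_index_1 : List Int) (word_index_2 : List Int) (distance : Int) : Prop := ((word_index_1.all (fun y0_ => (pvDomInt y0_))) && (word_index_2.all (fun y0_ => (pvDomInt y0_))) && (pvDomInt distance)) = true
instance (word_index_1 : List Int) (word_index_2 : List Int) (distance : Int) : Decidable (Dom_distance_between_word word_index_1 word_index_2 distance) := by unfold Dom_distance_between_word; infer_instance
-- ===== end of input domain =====

-- B replaces A's nested scan by a count dictionary of word_index_2 built once plus a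
-- single pass over word_index_1 (objective: faster, O(n+m) instead of O(n*m)).

-- ===== PORT A =====
def distance_between_word (word_index_1 : List Int) (word_index_2 : List Int) (distance : Int) : List Int :=
  word_index_1.foldl (fun distance_list index_1 =>
    word_index_2.foldl (fun dl index_2 =>
      if index_1 < index_2 then
        (if index_2 - index_1 = distance then dl ++ [index_1] else dl)
      else dl) distance_list) []

-- ===== PORT B =====
def distance_between_word_alt (word_index_1 : List Int) (word_index_2 : List Int) (distance : Int) : List Int :=
  if distance ≤ 0 then []
  else
    let cnt : PySem.Dict Int Int :=
      word_index_2.foldl (fun c j => c.insert j (c.getD j 0 + 1)) PySem.Dict.empty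
    word_index_1.foldl (fun res i => res ++ List.replicate (cnt.getD (i + distance) 0).toNat i) []

-- ===== PRECONDITION & SPEC =====
def Spec_distance_between_word (word_index_1 : List Int) (word_index_2 : List Int) (distance : Int) (out : List Int) : Prop := out = distance_between_word_alt word_index_1 word_index_2 distance
instance (word_index_1 : List Int) (word_index_2 : List Int) (distance : Int) (out : List Int) : Decidable (Spec_distance_between_word word_index_1 word_index_2 distance out) := by unfold Spec_distance_between_word; infer_instance

-- ===== CLAIM (what is proved, stated in full; the proofs are below) =====
def Claim_equal_distance_between_word : Prop := ∀ (word_index_1 : List Int) (word_index_2 : List Int) (distance : Int), Dom_distance_between_word word_index_1 word_index_2 distance → Spec_distance_between_word word_index_1 word_index_2 distance (distance_between_word word_index_1 word_index_2 distance)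

-- ===== LEMMAS AND PROOFS =====

-- A's inner loop over word_index_2 appends index_1 once per occurrence of index_1 + distance,
-- provided 0 < distance.
theorem inner_pos (w2 : List Int) (i d : Int) (hd : 0 < d) (acc : List Int) :
    w2.foldl (fun dl j => if i < j then (if j - i = d then dl ++ [i] else dl) else dl) acc
      = acc ++ List.replicate (w2.count (i + d)) i := by
  induction w2 generalizing acc with
  | nil => simp
  | cons j t ih =>
    simp only [List.foldl_cons, List.count_cons, ih]
    by_cases hj : j = i + d
    · subst hj
      rw [if_pos (by omega), if_pos (by omega)]
      simp [List.replicate_succ]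
    · have : ¬ (i < j ∧ j - i = d) := by omega
      by_cases h1 : i < j
      · rw [if_pos h1, if_neg (by omega)]
        simp [hj]
      · rw [if_neg h1]
        simp [hj]

theorem inner_nonpos (w2 : List Int) (i d : Int) (hd : d ≤ 0) (acc : List Int) :
    w2.foldl (fun dl j => if i < j then (if j - i = d then dl ++ [i] else dl) else dl) acc = acc := by
  induction w2 generalizing acc with
  | nil => rfl
  | cons j t ih =>
    simp only [List.foldl_cons]
    by_cases h1 : i < j
    · rw [if_pos h1, if_neg (by omega)]; exact ih acc
    · rw [if_neg h1]; exact ih acc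

-- ===== VERDICT (by name: the statement is the Claim_ definition above) =====
theorem distance_between_word_spec : Claim_equal_distance_between_word := by
  intro w1 w2 d hdom
  clear hdom
  unfold Spec_distance_between_word distance_between_word distance_between_word_alt
  by_cases hd : d ≤ 0
  · rw [if_pos hd]
    induction w1 with
    | nil => rfl
    | cons i t ih => simpa [inner_nonpos w2 i d hd] using ih
  · rw [if_neg hd]
    have hpos : 0 < d := by omega
    simp only [PySem.Dict.foldl_insert_getD_add_one_eq_counter, PySem.Dict.getD_counter, Int.toNat_natCast]
    have : ∀ acc : List Int,
        w1.foldl (fun dl i => w2.foldl (fun dl j => if i < j then (if j - i = d then dl ++ [i] else dl) else dl) dl) acc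
          = w1.foldl (fun res i => res ++ List.replicate (w2.count (i + d)) i) acc := by
      intro acc
      induction w1 generalizing acc with
      | nil => rfl
      | cons i t ih =>
        simp only [List.foldl_cons, inner_pos w2 i d hpos]
        exact ih _
    exact this []
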